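-- pv_equiv track=rewrite | github.com/TungNQVnext/dsq_system | backend/scripts/thermal_print_silent.py | find_target_printer
-- ===== SOURCE A (Python) =====
-- def find_target_printer(printers):
--     """Tìm máy in mục tiêu theo thứ tự ưu tiên"""
--     # Thứ tự ưu tiên tìm kiếm - ưu tiên TASKalfa cho testing WiFi
--     priority_keywords = [
--         ["TASKalfa", "TASK"],       # Máy in WiFi hiện tại cho testing
--         ["PRP-085", "PRP 085"],      # Máy in chính cho production
--         ["PRP-058US", "PRP 058US"],  # Máy in thermal khác
--         ["PRP", "058", "US", "085"], # Từ khóa model PRP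
--         ["thermal", "receipt"],      # Loại máy in thermal
--         ["80mm", "58mm"],           # Kích thước giấy
--         ["USB", "WiFi", "Network"],  # Kết nối
--         ["Epson", "Star", "Citizen", "Bixolon"], # Thương hiệu thermal phổ biến
--     ]
--
--     for keywords in priority_keywords:
--         for printer in printers:
--             for keyword in keywords:
--                 if keyword.upper() in printer.upper():
--                     return printer
--
--     return None
-- ===== SOURCE B (Python) =====
-- PRIORITY_GROUPS = [
--     ["TASKalfa", "TASK"],
--     ["PRP-085", "PRP 085"],
--     ["PRP-058US", "PRP 058US"],
--     ["PRP", "058", "US", "085"],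
--     ["thermal", "receipt"],
--     ["80mm", "58mm"],
--     ["USB", "WiFi", "Network"],
--     ["Epson", "Star", "Citizen", "Bixolon"],
-- ]
--
--
-- def find_target_printer(printers):
--     """Single pass: rank each printer by its best-matching priority group,
--     keep the first printer achieving the minimal rank."""
--     best = None  # (rank, printer)
--     for printer in printers:
--         up = printer.upper()
--         rank = next(
--             (i for i, kws in enumerate(PRIORITY_GROUPS)
--              if any(kw.upper() in up for kw in kws)),
--             None,
--         )
--         if rank is not None and (best is None or rank < best[0]):
--             best = (rank, printer)
--     return best[1] if best is not None else None
-- ===== Notes on version B (the rewrite author's own statement) =====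
-- stated objective: alternative
-- what changed: Replaced the group-outer triple loop (rescanning the printer list once per priority group) by a single pass over printers that computes each printer's best-matching group rank and keeps the running argmin (first printer on rank ties).
import Mathlib
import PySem

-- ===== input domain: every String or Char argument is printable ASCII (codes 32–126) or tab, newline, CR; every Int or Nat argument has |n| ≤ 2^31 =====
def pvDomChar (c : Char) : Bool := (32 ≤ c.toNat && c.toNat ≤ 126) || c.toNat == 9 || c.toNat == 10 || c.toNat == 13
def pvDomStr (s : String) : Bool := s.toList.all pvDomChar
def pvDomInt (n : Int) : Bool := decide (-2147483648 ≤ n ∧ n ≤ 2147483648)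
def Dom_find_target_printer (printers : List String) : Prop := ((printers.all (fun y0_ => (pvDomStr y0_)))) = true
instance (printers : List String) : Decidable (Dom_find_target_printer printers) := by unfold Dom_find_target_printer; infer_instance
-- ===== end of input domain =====

-- B replaces A's group-outer triple loop (one printer-list scan per priority group) by a single
-- pass over printers keeping the argmin of each printer's best-matching group rank (objective: alternative).

-- the fixed priority keyword table (shared constant data of both programs)
def pvGroups : List (List String) :=
  [ ["TASKalfa", "TASK"],
    ["PRP-085", "PRP 085"],
    ["PRP-058US", "PRP 058US"],
    ["PRP", "058", "US", "085"],
    ["thermal", "receipt"],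
    ["80mm", "58mm"],
    ["USB", "WiFi", "Network"],
    ["Epson", "Star", "Citizen", "Bixolon"] ]

-- ===== PORT A =====
-- innermost loop: for keyword in keywords: if keyword.upper() in printer.upper(): return printer
def pvKwLoop (printer : String) : List String → Option String
  | [] => none
  | k :: ks =>
      if PySem.Str.isIn (PySem.Str.upper k) (PySem.Str.upper printer) then some printer
      else pvKwLoop printer ks

-- middle loop: for printer in printers
def pvPrLoop (keywords : List String) : List String → Option String
  | [] => none
  | p :: ps =>
      match pvKwLoop p keywords with
      | some r => some r
      | none => pvPrLoop keywords ps

-- outer loop: for keywords in priority_keywords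
def pvGLoop (printers : List String) : List (List String) → Option String
  | [] => none
  | g :: gs =>
      match pvPrLoop g printers with
      | some r => some r
      | none => pvGLoop printers gs

def find_target_printer (printers : List String) : Option String :=
  pvGLoop printers pvGroups

-- ===== PORT B =====
-- rank of a printer: index of the first priority group with a matching keyword (enumerate + next)
def pvRankAux (up : String) (i : Nat) : List (List String) → Option Nat
  | [] => none
  | kws :: gs =>
      if kws.any (fun kw => PySem.Str.isIn (PySem.Str.upper kw) up) then some i
      else pvRankAux up (i + 1) gs

-- single pass over printers keeping best = (rank, printer), strict < so the first printer wins ties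
def pvBestLoop : Option (Nat × String) → List String → Option (Nat × String)
  | best, [] => best
  | best, p :: ps =>
      let up := PySem.Str.upper p
      let rank := pvRankAux up 0 pvGroups
      let best' :=
        match rank with
        | none => best
        | some r =>
            match best with
            | none => some (r, p)
            | some b => if r < b.1 then some (r, p) else best
      pvBestLoop best' ps

def find_target_printer_alt (printers : List String) : Option String :=
  (pvBestLoop none printers).map Prod.snd

-- ===== PRECONDITION & SPEC =====
def Spec_find_target_printer (printers : List String) (out : Option String) : Prop := out = find_target_printer_alt printers
instance (printers : List String) (out : Option String) : Decidable (Spec_find_target_printer printers out) := by unfold Spec_find_target_printer; infer_instance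

-- ===== CLAIM (what is proved, stated in full; the proofs are below) =====
def Claim_equal_find_target_printer : Prop := ∀ (printers : List String), Dom_find_target_printer printers → Spec_find_target_printer printers (find_target_printer printers)

-- ===== LEMMAS AND PROOFS =====

-- whether a printer matches a keyword group
def pvMatches (g : List String) (p : String) : Bool :=
  g.any (fun kw => PySem.Str.isIn (PySem.Str.upper kw) (PySem.Str.upper p))

-- generic argmin fold, parametrised over the rank function (pvBestLoop with rank abstracted)
def pvArgmin (r : String → Option Nat) : Option (Nat × String) → List String → Option (Nat × String)
  | best, [] => best
  | best, p :: ps =>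
      let best' :=
        match r p with
        | none => best
        | some k =>
            match best with
            | none => some (k, p)
            | some b => if k < b.1 then some (k, p) else best
      pvArgmin r best' ps

theorem pvBestLoop_eq_argmin (best : Option (Nat × String)) (ps : List String) :
    pvBestLoop best ps =
      pvArgmin (fun p => pvRankAux (PySem.Str.upper p) 0 pvGroups) best ps := by
  induction ps generalizing best with
  | nil => rfl
  | cons p ps ih => simpa [pvBestLoop, pvArgmin] using ih _

theorem pvKwLoop_eq (p : String) (ks : List String) :
    pvKwLoop p ks = if pvMatches ks p then some p else none := by
  induction ks with
  | nil => simp [pvKwLoop, pvMatches]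
  | cons k ks ih =>
      simp only [pvKwLoop, pvMatches, ih, List.any_cons, Bool.or_eq_true] at *
      split_ifs <;> tauto

theorem pvPrLoop_eq (g : List String) (ps : List String) :
    pvPrLoop g ps = ps.find? (fun p => pvMatches g p) := by
  induction ps with
  | nil => rfl
  | cons p ps ih =>
      simp only [pvPrLoop, pvKwLoop_eq, List.find?]
      by_cases h : pvMatches g p = true <;> simp [h, ih]

theorem pvRankAux_shift (up : String) (gs : List (List String)) (i : Nat) :
    pvRankAux up i gs = (pvRankAux up 0 gs).map (· + i) := by
  induction gs generalizing i with
  | nil => rfl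
  | cons g gs ih =>
      simp only [pvRankAux]
      by_cases h : g.any (fun kw => PySem.Str.isIn (PySem.Str.upper kw) up) = true
      · rw [if_pos h, if_pos h]; simp
      · rw [if_neg h, if_neg h, ih (i + 1), ih 1, Option.map_map]
        cases pvRankAux up 0 gs <;> simp <;> omega

theorem pvArgmin_congr (r₁ r₂ : String → Option Nat) (best : Option (Nat × String))
    (ps : List String) (h : ∀ p ∈ ps, r₁ p = r₂ p) :
    pvArgmin r₁ best ps = pvArgmin r₂ best ps := by
  induction ps generalizing best with
  | nil => rfl
  | cons p ps ih =>
      simp only [pvArgmin, h p (by simp)]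
      exact ih _ (fun q hq => h q (by simp [hq]))

theorem pvArgmin_none (r : String → Option Nat) (best : Option (Nat × String))
    (ps : List String) (h : ∀ p ∈ ps, r p = none) :
    pvArgmin r best ps = best := by
  induction ps generalizing best with
  | nil => rfl
  | cons p ps ih =>
      simp only [pvArgmin, h p (by simp)]
      exact ih _ (fun q hq => h q (by simp [hq]))

theorem pvArgmin_zero_keep (r : String → Option Nat) (q : String) (ps : List String) :
    pvArgmin r (some (0, q)) ps = some (0, q) := by
  induction ps with
  | nil => rfl
  | cons p ps ih =>
      simp only [pvArgmin]
      cases hr : r p with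
      | none => exact ih
      | some k => simpa [Nat.not_lt_zero] using ih

theorem pvArgmin_zero_find (r : String → Option Nat) (ps : List String)
    (best : Option (Nat × String)) (q : String)
    (hfind : ps.find? (fun p => r p == some 0) = some q)
    (hbest : best = none ∨ ∃ b, best = some b ∧ 0 < b.1) :
    pvArgmin r best ps = some (0, q) := by
  induction ps generalizing best with
  | nil => simp at hfind
  | cons p ps ih =>
      simp only [List.find?] at hfind
      by_cases hp : (r p == some 0) = true
      · have hq : q = p := by simp [hp] at hfind; exact hfind.symm
        have hr : r p = some 0 := by simpa using hp
        subst hq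
        simp only [pvArgmin, hr]
        rcases hbest with hb | ⟨b, hb, hb0⟩
        · subst hb; exact pvArgmin_zero_keep r q ps
        · subst hb
          simpa [hb0] using pvArgmin_zero_keep r q ps
      · simp only [hp] at hfind
        simp only [pvArgmin]
        cases hr : r p with
        | none =>
            rcases hbest with hb | ⟨b, hb, hb0⟩ <;> subst hb <;>
              exact ih _ hfind (by first | exact Or.inl rfl | exact Or.inr ⟨_, rfl, hb0⟩)
        | some k =>
            have hk : 0 < k := by
              rcases Nat.eq_zero_or_pos k with h0 | h0
              · exact absurd (by simp [hr, h0]) hp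
              · exact h0
            rcases hbest with hb | ⟨b, hb, hb0⟩
            · subst hb
              have hgoal : pvArgmin r (some (k, p)) ps = some (0, q) :=
                ih _ hfind (Or.inr ⟨(k, p), rfl, hk⟩)
              simpa using hgoal
            · subst hb
              by_cases hkb : k < b.1
              · have hgoal : pvArgmin r (some (k, p)) ps = some (0, q) :=
                  ih _ hfind (Or.inr ⟨(k, p), rfl, hk⟩)
                simpa [hkb] using hgoal
              · have hgoal : pvArgmin r (some b) ps = some (0, q) :=
                  ih _ hfind (Or.inr ⟨b, rfl, hb0⟩)
                simpa [hkb] using hgoal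

theorem pvArgmin_shift (r : String → Option Nat) (best : Option (Nat × String))
    (ps : List String) :
    pvArgmin (fun p => (r p).map (· + 1)) (best.map (fun b => (b.1 + 1, b.2))) ps =
      (pvArgmin r best ps).map (fun b => (b.1 + 1, b.2)) := by
  induction ps generalizing best with
  | nil => rfl
  | cons p ps ih =>
      simp only [pvArgmin]
      cases hr : r p with
      | none => simpa using ih best
      | some k =>
          cases best with
          | none => simpa using ih (some (k, p))
          | some b =>
              by_cases hk : k < b.1
              · have : k + 1 < b.1 + 1 := by omega
                simpa [hk, this] using ih (some (k, p))
              · have : ¬ (k + 1 < b.1 + 1) := by omega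
                simpa [hk, this] using ih (some b)

theorem pvMain (gs : List (List String)) (printers : List String) :
    pvGLoop printers gs =
      (pvArgmin (fun p => pvRankAux (PySem.Str.upper p) 0 gs) none printers).map Prod.snd := by
  induction gs with
  | nil =>
      have h := pvArgmin_none (fun p => pvRankAux (PySem.Str.upper p) 0 []) none printers
        (fun p _ => rfl)
      rw [h]
      rfl
  | cons g gs ih =>
      simp only [pvGLoop, pvPrLoop_eq]
      have hrank : ∀ p : String, pvRankAux (PySem.Str.upper p) 0 (g :: gs) =
          if pvMatches g p then some 0
          else (pvRankAux (PySem.Str.upper p) 0 gs).map (· + 1) := by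
        intro p
        simp only [pvRankAux, pvMatches]
        rw [pvRankAux_shift]
        norm_num
      cases hf : printers.find? (fun p => pvMatches g p) with
      | some q =>
          have hpred : (fun p => pvRankAux (PySem.Str.upper p) 0 (g :: gs) == some 0) =
              (fun p => pvMatches g p) := by
            funext p
            rw [hrank p]
            by_cases hm : pvMatches g p = true
            · simp [hm]
            · rw [if_neg hm]
              cases pvRankAux (PySem.Str.upper p) 0 gs <;> simp [hm]
          have h0 := pvArgmin_zero_find (fun p => pvRankAux (PySem.Str.upper p) 0 (g :: gs))
            printers none q (by rw [hpred]; exact hf) (Or.inl rfl)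
          rw [h0]
          rfl
      | none =>
          have hnone := List.find?_eq_none.mp hf
          have hcongr : ∀ p ∈ printers, pvRankAux (PySem.Str.upper p) 0 (g :: gs) =
              (fun p => (pvRankAux (PySem.Str.upper p) 0 gs).map (· + 1)) p := by
            intro p hp
            rw [hrank p, if_neg (by simpa using hnone p hp)]
          rw [pvArgmin_congr _ _ _ _ hcongr]
          have hshift := pvArgmin_shift (fun p => pvRankAux (PySem.Str.upper p) 0 gs) none printers
          simp only [Option.map_none] at hshift
          rw [hshift, ih, Option.map_map]
          cases pvArgmin (fun p => pvRankAux (PySem.Str.upper p) 0 gs) none printers <;> rfl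

-- ===== VERDICT (by name: the statement is the Claim_ definition above) =====
theorem find_target_printer_spec : Claim_equal_find_target_printer := by
  intro printers _
  unfold Spec_find_target_printer find_target_printer find_target_printer_alt
  rw [pvBestLoop_eq_argmin, pvMain]
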